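-- pv_equiv track=rewrite | github.com/LarrySnyder/stockpyl | stockpyl/helpers.py | sort_dict_by_keys
-- ===== SOURCE A (Python) =====
-- def sort_dict_by_keys(d, ascending=True, return_values=True):
-- 	"""Sort dict by keys and return sorted list of values or keys, depending
-- 	on the value of ``return_values``.
-- 	Special handling is included to handle keys that might be ``None``.
-- 	(``None`` is assumed to come before any other element when sorting in
-- 	ascending order.)
--
-- 	Parameters
-- 	----------
-- 	d : dict
-- 		The dict to sort.
-- 	ascending : bool, optional
-- 		Sort order.
-- 	return_values : bool, optional
-- 		Set to ``True`` to return a list of the dict's values, ``False`` to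
-- 		return its keys.
--
-- 	Returns
-- 	-------
-- 	return_list : list
-- 		List of values or keys of ``d``, sorted in order of keys of ``d``.
--
-- 	"""
-- 	# Create dict equal to d but without None key.
-- 	dict_without_none = {key: d[key] for key in d.keys() if key is not None}
--
-- 	if return_values:
-- 		# Build sorted list of values in dict_without_none.
-- 		return_list = [value for _, value in sorted(dict_without_none.items(), reverse=not ascending)]
--
-- 		# If original dict had None key, add it back.
-- 		if None in d.keys():
-- 			if ascending:
-- 				return_list.insert(0, d[None])
-- 			else:
-- 				return_list.append(d[None])
-- 	else:
-- 		# Build sorted list of keys in dict_without_none.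
-- 		return_list = [key for key, _ in sorted(dict_without_none.items(), reverse=not ascending)]
--
-- 		# If original dict had None key, add it back.
-- 		if None in d.keys():
-- 			if ascending:
-- 				return_list.insert(0, None)
-- 			else:
-- 				return_list.append(None)
--
-- 	return return_list
-- ===== SOURCE B (Python) =====
-- def sort_dict_by_keys(d, ascending=True, return_values=True):
--     """Single sorted pass over the keys: a None key sorts before every int key
--     via the boolean component of the sort key, so reverse=not ascending puts it
--     first when ascending and last when descending -- no partition/reinsert."""
--     keys = sorted(d.keys(),
--                   key=lambda k: (k is not None, 0 if k is None else k),
--                   reverse=not ascending)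
--     if return_values:
--         return [d[k] for k in keys]
--     return keys
-- ===== Notes on version B (the rewrite author's own statement) =====
-- stated objective: simpler
-- what changed: A builds a second dict without the None key, sorts its items and conditionally re-inserts the None entry at the front or back in two separate branches; B sorts the key list once with a (is-not-None, key) sort key and reverse=not ascending, which places a None key correctly by itself, then maps keys to values if requested.
import Mathlib
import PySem

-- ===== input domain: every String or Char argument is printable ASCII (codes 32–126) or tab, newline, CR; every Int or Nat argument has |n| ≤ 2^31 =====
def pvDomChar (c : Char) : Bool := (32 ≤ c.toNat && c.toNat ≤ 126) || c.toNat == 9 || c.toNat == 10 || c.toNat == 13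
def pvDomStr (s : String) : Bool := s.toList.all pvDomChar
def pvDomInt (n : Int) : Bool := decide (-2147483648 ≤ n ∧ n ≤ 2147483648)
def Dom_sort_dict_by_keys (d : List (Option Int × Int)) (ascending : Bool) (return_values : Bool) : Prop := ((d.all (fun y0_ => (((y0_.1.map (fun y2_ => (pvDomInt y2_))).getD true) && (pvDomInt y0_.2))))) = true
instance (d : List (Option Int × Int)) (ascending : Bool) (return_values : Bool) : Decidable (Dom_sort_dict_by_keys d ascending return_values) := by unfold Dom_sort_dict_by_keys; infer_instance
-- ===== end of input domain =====

-- B replaces A's partition/sort/re-insert of the None key by one sorted pass over the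
-- keys with a (is-not-None, key) sort key (same cost; simpler decomposition).


-- ===== PORT A =====
-- Literal port of A.  `sorted(dict_without_none.items(), …)` compares (key, value) pairs
-- lexicographically; every key in dict_without_none is a non-None int, so Python compares
-- the ints — ported as the tuple key (p.1.getD 0, p.2) via sorted2 (exact there).
def sort_dict_by_keys (d : List (Option Int × Int)) (ascending : Bool) (return_values : Bool) : List (Option Int) :=
  let dd : PySem.Dict (Option Int) Int := PySem.Dict.mk d
  -- dict_without_none = {key: d[key] for key in d.keys() if key is not None}
  let dict_without_none : PySem.Dict (Option Int) Int :=
    dd.keys.foldl (fun acc key => if key ≠ none then acc.insert key (dd.getD key 0) else acc) PySem.Dict.empty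
  if return_values then
    let return_list := (PySem.List.sorted2 dict_without_none.items (fun p => p.1.getD 0) (fun p => p.2) (!ascending)).map (fun p => (some p.2 : Option Int))
    if none ∈ dd.keys then
      if ascending then some (dd.getD none 0) :: return_list
      else return_list ++ [some (dd.getD none 0)]
    else return_list
  else
    let return_list := (PySem.List.sorted2 dict_without_none.items (fun p => p.1.getD 0) (fun p => p.2) (!ascending)).map (fun p => p.1)
    if none ∈ dd.keys then
      if ascending then none :: return_list
      else return_list ++ [none]
    else return_list

-- ===== PORT B =====
-- Literal port of Source B: key=lambda k: (k is not None, 0 if k is None else k) → sorted2.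
def sort_dict_by_keys_alt (d : List (Option Int × Int)) (ascending : Bool) (return_values : Bool) : List (Option Int) :=
  let dd : PySem.Dict (Option Int) Int := PySem.Dict.mk d
  let keys := PySem.List.sorted2 dd.keys (fun k => k.isSome) (fun k => if k = none then 0 else k.getD 0) (!ascending)
  if return_values then keys.map (fun k => (some (dd.getD k 0) : Option Int))
  else keys

-- ===== PRECONDITION & SPEC =====
-- Pre_ excludes association lists with duplicate keys: the Python argument is a dict, whose
-- keys are unique by construction, so duplicate-key lists represent no Python input.
def Pre_sort_dict_by_keys (d : List (Option Int × Int)) (ascending : Bool) (return_values : Bool) : Prop :=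
  (d.map Prod.fst).Nodup
instance (d : List (Option Int × Int)) (ascending : Bool) (return_values : Bool) : Decidable (Pre_sort_dict_by_keys d ascending return_values) := by unfold Pre_sort_dict_by_keys; infer_instance

def pvWitness_sort_dict_by_keys : (List (Option Int × Int)) × Bool × Bool := ([(some 3, 5), (none, 7), (some (-1), 2)], true, true)

def Spec_sort_dict_by_keys (d : List (Option Int × Int)) (ascending : Bool) (return_values : Bool) (out : List (Option Int)) : Prop := out = sort_dict_by_keys_alt d ascending return_values
instance (d : List (Option Int × Int)) (ascending : Bool) (return_values : Bool) (out : List (Option Int)) : Decidable (Spec_sort_dict_by_keys d ascending return_values out) := by unfold Spec_sort_dict_by_keys; infer_instance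

-- ===== CLAIM (what is proved, stated in full; the proofs are below) =====
def Claim_equal_sort_dict_by_keys : Prop := ∀ (d : List (Option Int × Int)) (ascending : Bool) (return_values : Bool), Dom_sort_dict_by_keys d ascending return_values → Pre_sort_dict_by_keys d ascending return_values → Spec_sort_dict_by_keys d ascending return_values (sort_dict_by_keys d ascending return_values)

-- ===== LEMMAS AND PROOFS =====

theorem sorted2_eq_sorted_toLex {α κ₁ κ₂ : Type} [LinearOrder κ₁] [LinearOrder κ₂]
    (xs : List α) (k1 : α → κ₁) (k2 : α → κ₂) (rev : Bool) :
    PySem.List.sorted2 xs k1 k2 rev = PySem.List.sorted xs (fun x => toLex (k1 x, k2 x)) rev := by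
  have hlt : ∀ a b : α,
      (decide (k1 a < k1 b) || (!decide (k1 b < k1 a) && decide (k2 a < k2 b)))
        = decide (toLex (k1 a, k2 a) < toLex (k1 b, k2 b)) := by
    intro a b
    rcases lt_trichotomy (k1 a) (k1 b) with h | h | h
    · simp [h, Prod.Lex.lt_iff, not_lt_of_gt h]
    · simp [h, Prod.Lex.lt_iff]
    · simp [h, Prod.Lex.lt_iff, not_lt_of_gt h, ne_of_gt h]
  simp only [PySem.List.sorted2, PySem.List.sorted]
  cases rev
  · simp only [Bool.false_eq_true, if_false]
    exact congrArg (fun f => List.foldl (fun acc x => PySem.List.insertBy f x acc) [] xs)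
      (funext fun a => funext fun b => hlt a b)
  · simp only [if_true]
    exact congrArg (fun f => List.foldl (fun acc x => PySem.List.insertBy f x acc) [] xs)
      (funext fun a => funext fun b => hlt b a)


theorem filter_none_singleton (ks : List (Option Int)) (hnd : ks.Nodup) (h : none ∈ ks) :
    ks.filter (fun k => decide (k = none)) = [none] := by
  induction ks with
  | nil => cases h
  | cons a t ih =>
    rcases List.nodup_cons.mp hnd with ⟨ha, hnt⟩
    by_cases hae : a = none
    · subst hae
      have : t.filter (fun k => decide (k = none)) = [] := by
        apply List.filter_eq_nil_iff.mpr
        intro k hk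
        simp only [decide_eq_true_eq]
        intro hkn; subst hkn; exact ha hk
      simp [this]
    · have hnt' : none ∈ t := by
        rcases List.mem_cons.mp h with h | h
        · exact absurd h.symm hae
        · exact h
      simp [hae, ih hnt hnt']


theorem pairwise_lt_sorted_getD (fks : List (Option Int)) (hnd : fks.Nodup)
    (hfk : ∀ k ∈ fks, k ≠ none) (rev : Bool) :
    (PySem.List.sorted fks (fun k => k.getD 0) rev).Pairwise
      (fun a b => if rev then b.getD 0 < a.getD 0 else a.getD 0 < b.getD 0) := by
  have hperm := PySem.List.sorted_perm fks (fun k => k.getD 0) rev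
  have hnd' : (PySem.List.sorted fks (fun k => k.getD 0) rev).Nodup := hperm.nodup_iff.mpr hnd
  have hinj : ∀ a ∈ fks, ∀ b ∈ fks, a ≠ b → a.getD 0 ≠ b.getD 0 := by
    intro a ha b hb hab
    have ha' := hfk a ha; have hb' := hfk b hb
    cases a with
    | none => exact absurd rfl ha'
    | some x => cases b with
      | none => exact absurd rfl hb'
      | some y => simpa using fun hxy => hab (by simp [hxy])
  cases rev
  · have hle := PySem.List.sorted_pairwise fks (fun k => k.getD 0)
    have := hle.and hnd'
    refine this.imp_of_mem ?_
    intro a b ha hb ⟨h1, h2⟩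
    have ha' := hperm.mem_iff.mp ha
    have hb' := hperm.mem_iff.mp hb
    simpa using lt_of_le_of_ne h1 (hinj a ha' b hb' h2)
  · have hle := PySem.List.sorted_pairwise_rev fks (fun k => k.getD 0)
    have := hle.and hnd'
    refine this.imp_of_mem ?_
    intro a b ha hb ⟨h1, h2⟩
    have ha' := hperm.mem_iff.mp ha
    have hb' := hperm.mem_iff.mp hb
    simpa using lt_of_le_of_ne h1 (fun he => hinj a ha' b hb' h2 he.symm)


theorem sortedA_map (fks : List (Option Int)) (hnd : fks.Nodup)
    (hfk : ∀ k ∈ fks, k ≠ none) (f : Option Int → Int) (rev : Bool) :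
    PySem.List.sorted (fks.map (fun k => (k, f k))) (fun p => toLex (p.1.getD 0, p.2)) rev
      = (PySem.List.sorted fks (fun k => k.getD 0) rev).map (fun k => (k, f k)) := by
  have hperm : ((PySem.List.sorted fks (fun k => k.getD 0) rev).map (fun k => (k, f k))).Perm
      (fks.map (fun k => (k, f k))) :=
    (PySem.List.sorted_perm fks (fun k => k.getD 0) rev).map _
  have hpw := pairwise_lt_sorted_getD fks hnd hfk rev
  cases rev
  · apply PySem.List.sorted_eq_of_perm_of_pairwise_lt _ _ _ hperm
    apply List.pairwise_map.mpr
    refine hpw.imp ?_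
    intro a b h
    simp only at h
    exact Prod.Lex.lt_iff.mpr (Or.inl h)
  · apply PySem.List.sorted_rev_eq_of_perm_of_pairwise_gt _ _ _ hperm
    apply List.pairwise_map.mpr
    refine hpw.imp ?_
    intro a b h
    simp only [if_true] at h
    exact Prod.Lex.lt_iff.mpr (Or.inl h)


theorem sortedB_char (ks : List (Option Int)) (hnd : ks.Nodup) (rev : Bool) :
    PySem.List.sorted ks (fun k => toLex (k.isSome, k.getD 0)) rev
      = (if rev then
          PySem.List.sorted (ks.filter (fun k => decide (k ≠ none))) (fun k => k.getD 0) rev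
            ++ (if none ∈ ks then [none] else [])
         else
          (if none ∈ ks then [none] else [])
            ++ PySem.List.sorted (ks.filter (fun k => decide (k ≠ none))) (fun k => k.getD 0) rev) := by
  set fks := ks.filter (fun k => decide (k ≠ none)) with hfks
  have hndf : fks.Nodup := hnd.filter _
  have hfk : ∀ k ∈ fks, k ≠ none := by
    intro k hk
    have := List.of_mem_filter hk
    simpa using this
  have hcell : ks.filter (fun k => decide (k = none)) = (if none ∈ ks then [none] else []) := by
    by_cases h : none ∈ ks
    · simp [h, filter_none_singleton ks hnd h]
    · simp only [h, if_false]
      apply List.filter_eq_nil_iff.mpr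
      intro k hk
      simp only [decide_eq_true_eq]
      intro hkn; subst hkn; exact h hk
  have hperm0 : ((if none ∈ ks then [none] else []) ++ fks).Perm ks := by
    have h1 := List.filter_append_perm (fun k => decide (k = none)) ks
    have h2 : (fun (k : Option Int) => !decide (k = none)) = (fun k => decide (k ≠ none)) := by
      funext k; simp [decide_not]
    rw [hcell, h2] at h1
    exact h1
  have hpw := pairwise_lt_sorted_getD fks hndf hfk rev
  have hsperm := PySem.List.sorted_perm fks (fun k => k.getD 0) rev
  have hmem : ∀ b ∈ PySem.List.sorted fks (fun k => k.getD 0) rev, b ≠ none := by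
    intro b hb; exact hfk b (hsperm.mem_iff.mp hb)
  cases rev
  · simp only [Bool.false_eq_true, if_false]
    apply PySem.List.sorted_eq_of_perm_of_pairwise_lt
    · exact ((List.Perm.refl _).append hsperm).trans hperm0
    · apply List.pairwise_append.mpr
      refine ⟨?_, ?_, ?_⟩
      · by_cases h : none ∈ ks <;> simp [h]
      · refine hpw.imp_of_mem ?_
        intro a b ha hb h
        simp only at h
        have ha' := hmem a ha; have hb' := hmem b hb
        refine Prod.Lex.lt_iff.mpr (Or.inr ⟨?_, h⟩)
        rcases a with _ | x
        · exact absurd rfl ha'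
        rcases b with _ | y
        · exact absurd rfl hb'
        rfl
      · intro a ha b hb
        have han : a = none := by
          by_cases h : none ∈ ks
          · simp [h] at ha; exact ha
          · simp [h] at ha
        have hbn := hmem b hb
        subst han
        refine Prod.Lex.lt_iff.mpr (Or.inl ?_)
        rcases b with _ | y
        · exact absurd rfl hbn
        · simp
  · simp only [if_true]
    apply PySem.List.sorted_rev_eq_of_perm_of_pairwise_gt
    · exact (hsperm.append (List.Perm.refl _)).trans ((List.perm_append_comm).trans hperm0)
    · apply List.pairwise_append.mpr
      refine ⟨?_, ?_, ?_⟩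
      · refine hpw.imp_of_mem ?_
        intro a b ha hb h
        simp only [if_pos] at h
        have ha' := hmem a ha; have hb' := hmem b hb
        refine Prod.Lex.lt_iff.mpr (Or.inr ⟨?_, h⟩)
        rcases a with _ | x
        · exact absurd rfl ha'
        rcases b with _ | y
        · exact absurd rfl hb'
        rfl
      · by_cases h : none ∈ ks <;> simp [h]
      · intro a ha b hb
        have hbn : b = none := by
          by_cases h : none ∈ ks
          · simp [h] at hb; exact hb
          · simp [h] at hb
        have han := hmem a ha
        subst hbn
        refine Prod.Lex.lt_iff.mpr (Or.inl ?_)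
        rcases a with _ | y
        · exact absurd rfl han
        · simp


theorem dwn_items (d : List (Option Int × Int)) (hnd : (d.map Prod.fst).Nodup) :
    ((PySem.Dict.mk d).keys.foldl
        (fun acc key => if key ≠ none then acc.insert key ((PySem.Dict.mk d).getD key 0) else acc)
        PySem.Dict.empty).items
      = ((d.map Prod.fst).filter (fun k => decide (k ≠ none))).map
          (fun k => (k, (PySem.Dict.mk d).getD k 0)) := by
  have hkeys : (PySem.Dict.mk d).keys = d.map Prod.fst := by
    simp [PySem.Dict.keys_mk]
  rw [hkeys]
  have hfe : (fun (acc : PySem.Dict (Option Int) Int) key =>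
        if key ≠ none then acc.insert key ((PySem.Dict.mk d).getD key 0) else acc)
      = (fun acc key =>
        if (fun (k : Option Int) => decide (k ≠ none)) key = true
        then acc.insert key ((PySem.Dict.mk d).getD key 0) else acc) := by
    funext acc key; simp
  rw [hfe, ← List.foldl_filter]
  rw [PySem.Dict.items_foldl_insert_fresh _ (fun a => a) (fun a => (PySem.Dict.mk d).getD a 0)
        PySem.Dict.empty (fun a _ => PySem.Dict.contains_empty a) (by simpa using hnd.filter _)]
  simp [PySem.Dict.empty]


-- ===== VERDICT (by name: the statement is the Claim_ definition above) =====
theorem sort_dict_by_keys_spec : Claim_equal_sort_dict_by_keys := by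
  intro d ascending return_values _hdom hpre
  unfold Pre_sort_dict_by_keys at hpre
  unfold Spec_sort_dict_by_keys
  simp only [sort_dict_by_keys, sort_dict_by_keys_alt]
  rw [dwn_items d hpre]
  simp only [sorted2_eq_sorted_toLex]
  have hk2 : (fun (k : Option Int) => toLex (k.isSome, if k = none then 0 else k.getD 0))
      = (fun (k : Option Int) => toLex (k.isSome, k.getD 0)) := by
    funext k; cases k <;> simp
  rw [hk2]
  have hkeys : (PySem.Dict.mk d).keys = d.map Prod.fst := by simp [PySem.Dict.keys_mk]
  rw [hkeys]
  set ks := d.map Prod.fst with hks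
  set fks := ks.filter (fun k => decide (k ≠ none)) with hfks
  have hndf : fks.Nodup := hpre.filter _
  have hfk : ∀ k ∈ fks, k ≠ none := by
    intro k hk; simpa using List.of_mem_filter hk
  rw [sortedA_map fks hndf hfk _ (!ascending), sortedB_char ks hpre (!ascending)]
  have hff : ks.filter (fun k => !decide (k = none)) = fks := by
    rw [hfks]; congr 1; funext k; simp [decide_not]
  cases ascending <;> cases return_values <;> by_cases h : none ∈ ks <;>
    simp [h, hff, List.map_map, Function.comp_def]
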